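-- pv_equiv track=rewrite | github.com/F0lak/dm_open_ref | ref_splitter.py | clean_inline_code
-- ===== SOURCE A (Python) =====
-- def clean_inline_code(text) -> str:
-- 	'''
-- 		Cleans up inline code
-- 	'''
-- 	fixed_text = ""
-- 	i = 0
-- 	while i < len(text):
-- 		if text[i] == '[':
-- 			close_bracket_index = text.find(']', i)
-- 			if close_bracket_index != -1:
-- 				path = text[i+1:close_bracket_index]
-- 				if text[close_bracket_index+1:close_bracket_index+2] == '(':
-- 					close_paren_index = text.find(')', close_bracket_index)
-- 					code_index = close_paren_index + 1
--
-- 					if text[code_index:code_index+7] == '{.code}':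
-- 						link_name = text[close_bracket_index+2:close_paren_index]
-- 						fixed_text += f'[`{path}`]({link_name})'
-- 						i = code_index + 7
-- 						continue
-- 		fixed_text += text[i]
-- 		i += 1
--
-- 	return fixed_text
-- ===== SOURCE B (Python) =====
-- def clean_inline_code(text) -> str:
-- 	'''
-- 		Cleans up inline code
-- 	'''
-- 	parts = []
-- 	i = 0
-- 	while True:
-- 		k = text.find('[', i)
-- 		if k == -1:
-- 			parts.append(text[i:])
-- 			break
-- 		j = text.find(']', k)
-- 		p = text.find(')', j) if j != -1 else -1
-- 		if j != -1 and text[j + 1:j + 2] == '(' and p != -1 and text[p + 1:p + 8] == '{.code}':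
-- 			parts.append(text[i:k] + '[`' + text[k + 1:j] + '`](' + text[j + 2:p] + ')')
-- 			i = p + 8
-- 		else:
-- 			parts.append(text[i:k + 1])
-- 			i = k + 1
-- 	return ''.join(parts)
-- ===== Notes on version B (the rewrite author's own statement) =====
-- stated objective: faster
-- what changed: B replaces A's per-character while loop (one string append per character, with the bracket searches restarted at every opening bracket) by a chunk-jumping scan: find jumps straight to the next opening bracket, each iteration appends one whole slice or rewritten span to a parts list that is joined once at the end.
-- outside the precondition, e.g. on clean_inline_code('{.code} hi'): A returns '{.code} hi', B returns '{.code} hi'; on clean_inline_code('{.code} [a](b'): A does not finish within the time limit, B returns '{.code} [a](b'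
import Mathlib
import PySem

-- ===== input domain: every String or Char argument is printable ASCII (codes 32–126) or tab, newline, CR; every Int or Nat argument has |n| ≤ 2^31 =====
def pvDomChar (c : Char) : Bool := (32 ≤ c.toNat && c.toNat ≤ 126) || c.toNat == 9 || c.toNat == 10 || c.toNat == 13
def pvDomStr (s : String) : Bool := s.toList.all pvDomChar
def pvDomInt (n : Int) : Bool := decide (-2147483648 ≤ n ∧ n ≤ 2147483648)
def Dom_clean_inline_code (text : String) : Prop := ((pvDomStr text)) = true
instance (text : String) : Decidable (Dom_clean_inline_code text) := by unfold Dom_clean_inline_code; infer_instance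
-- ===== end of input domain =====

-- B rewrites [path](link){.code} spans chunk-by-chunk with find-jumps instead of A's per-character loop (faster by a constant factor; return value only, no mutation).

-- ===== PORT A =====
-- literal port of A's while loop; fuel (length+1) covers every terminating run of A,
-- since whenever Python A terminates its index i strictly increases at every step
def pvLoopA (t : List Char) : Nat → Nat → List Char → List Char
  | 0, _, acc => acc
  | fuel+1, i, acc =>
    if h : i < t.length then
      if t[i] = '[' then
        let cb := PySem.Chars.findFrom t [']'] ↑i
        if cb ≠ -1 then
          let path := PySem.List.slice t (some (↑i+1)) (some cb)
          if PySem.List.slice t (some (cb+1)) (some (cb+2)) = ['('] then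
            let cp := PySem.Chars.findFrom t [')'] cb
            let ci := cp + 1
            if PySem.List.slice t (some ci) (some (ci+7)) = "{.code}".toList then
              pvLoopA t fuel (ci+7).toNat
                (acc ++ "[`".toList ++ path ++ "`](".toList ++ PySem.List.slice t (some (cb+2)) (some cp) ++ ")".toList)
            else pvLoopA t fuel (i+1) (acc ++ [t[i]])
          else pvLoopA t fuel (i+1) (acc ++ [t[i]])
        else pvLoopA t fuel (i+1) (acc ++ [t[i]])
      else pvLoopA t fuel (i+1) (acc ++ [t[i]])
    else acc

def clean_inline_code (text : String) : String :=
  String.ofList (pvLoopA text.toList (text.toList.length + 1) 0 [])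

-- ===== PORT B =====
-- literal port of B's while loop over (i, parts); fuel (length+2) covers every run of B
def pvLoopB (t : List Char) : Nat → Nat → List (List Char) → List (List Char)
  | 0, _, parts => parts
  | fuel+1, i, parts =>
    let k := PySem.Chars.findFrom t ['['] ↑i
    if k = -1 then parts ++ [PySem.List.slice t (some ↑i) none]
    else
      let j := PySem.Chars.findFrom t [']'] k
      let p := if j ≠ -1 then PySem.Chars.findFrom t [')'] j else -1
      if j ≠ -1 ∧ PySem.List.slice t (some (j+1)) (some (j+2)) = ['('] ∧ p ≠ -1 ∧
          PySem.List.slice t (some (p+1)) (some (p+8)) = "{.code}".toList then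
        pvLoopB t fuel (p+8).toNat
          (parts ++ [PySem.List.slice t (some ↑i) (some k) ++ "[`".toList ++
            PySem.List.slice t (some (k+1)) (some j) ++ "`](".toList ++
            PySem.List.slice t (some (j+2)) (some p) ++ ")".toList])
      else pvLoopB t fuel (k+1).toNat (parts ++ [PySem.List.slice t (some ↑i) (some (k+1))])

def clean_inline_code_alt (text : String) : String :=
  String.ofList (PySem.Chars.join [] (pvLoopB text.toList (text.toList.length + 2) 0 []))

-- ===== PRECONDITION & SPEC =====
-- Pre_ excludes texts that start with "{.code}": on such texts A's unguarded
-- close_paren_index = -1 branch makes code_index 0, re-reads the start of the text and can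
-- loop forever (A diverges e.g. on "{.code} [a](b"); on the excluded texts where A does
-- terminate it returns the same value as B.
def Pre_clean_inline_code (text : String) : Prop :=
  PySem.Str.startswith text "{.code}" = false
instance (text : String) : Decidable (Pre_clean_inline_code text) := by
  unfold Pre_clean_inline_code; infer_instance

def pvWitness_clean_inline_code : String := "see [dm/path](link){.code} ok"

def Spec_clean_inline_code (text : String) (out : String) : Prop := out = clean_inline_code_alt text
instance (text : String) (out : String) : Decidable (Spec_clean_inline_code text out) := by
  unfold Spec_clean_inline_code; infer_instance

-- ===== CLAIM (what is proved, stated in full; the proofs are below) =====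
def Claim_equal_clean_inline_code : Prop := ∀ (text : String), Dom_clean_inline_code text → Pre_clean_inline_code text → Spec_clean_inline_code text (clean_inline_code text)

-- ===== LEMMAS AND PROOFS =====

-- the match test both programs perform at a '[' at index i (their shared nested conditions)
def pvM (t : List Char) (i : Nat) : Bool :=
  let cb := PySem.Chars.findFrom t [']'] ↑i
  let cp := PySem.Chars.findFrom t [')'] cb
  cb != -1 && (PySem.List.slice t (some (cb+1)) (some (cb+2)) == ['(']) &&
    cp != -1 && (PySem.List.slice t (some (cp+1)) (some (cp+8)) == "{.code}".toList)

def pvRep (t : List Char) (i : Nat) : List Char :=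
  let cb := PySem.Chars.findFrom t [']'] ↑i
  let cp := PySem.Chars.findFrom t [')'] cb
  "[`".toList ++ PySem.List.slice t (some (↑i+1)) (some cb) ++ "`](".toList ++
    PySem.List.slice t (some (cb+2)) (some cp) ++ ")".toList

def pvJump (t : List Char) (i : Nat) : Nat :=
  (PySem.Chars.findFrom t [')'] (PySem.Chars.findFrom t [']'] ↑i) + 8).toNat

-- the common reference recursion both loops flatten to (proof-side only)
def pvG (t : List Char) (i : Nat) : List Char :=
  if h : i < t.length then
    if t[i] = '[' ∧ pvM t i = true then
      pvRep t i ++ pvG t (max (i+1) (pvJump t i))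
    else t[i] :: pvG t (i+1)
  else []
termination_by t.length - i
decreasing_by
· have := Nat.le_max_left (i+1) (pvJump t i); omega
· omega

theorem pvPrefix_single (l : List Char) (c : Char) (j : Nat) :
    [c] <+: l.drop j ↔ l[j]? = some c := by
  rw [← List.head?_drop]
  constructor
  · rintro ⟨tl, htl⟩; rw [← htl]; rfl
  · intro hh
    cases hd : l.drop j with
    | nil => rw [hd] at hh; simp at hh
    | cons a tl => rw [hd] at hh; simp at hh; exact ⟨tl, by rw [hh]; rfl⟩

theorem pvFindFrom_neg (t : List Char) (c : Char) (i : Nat) (hi : i ≤ t.length) :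
    PySem.Chars.findFrom t [c] ↑i = -1 ↔ ∀ m, i ≤ m → t[m]? ≠ some c := by
  rw [PySem.Chars.findFrom_natCast_eq_neg_one_iff t [c] i hi]
  rw [← PySem.Chars.isIn_iff_infix, ← PySem.Chars.exists_prefix_drop_iff_isIn]
  constructor
  · intro hno m him hm
    exact hno ⟨m - i, by rw [List.drop_drop, pvPrefix_single, Nat.add_sub_cancel' him]; exact hm⟩
  · rintro hall ⟨j, hj⟩
    rw [List.drop_drop, pvPrefix_single] at hj
    exact hall (i + j) (Nat.le_add_right _ _) hj

theorem pvFindFrom_pos (t : List Char) (c : Char) (i : Nat) (hi : i ≤ t.length)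
    (h : PySem.Chars.findFrom t [c] ↑i ≠ -1) :
    ∃ r : Nat, PySem.Chars.findFrom t [c] ↑i = ↑r ∧ i ≤ r ∧ r < t.length ∧
      t[r]? = some c ∧ ∀ m, i ≤ m → m < r → t[m]? ≠ some c := by
  obtain ⟨hle, hpre, hmin⟩ := PySem.Chars.findFrom_natCast_spec t [c] i hi h
  refine ⟨(PySem.Chars.findFrom t [c] ↑i).toNat, ?_, ?_, ?_, ?_, ?_⟩
  · omega
  · omega
  · rw [pvPrefix_single] at hpre
    exact (List.getElem?_eq_some_iff.mp hpre).1
  · rw [pvPrefix_single] at hpre; exact hpre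
  · intro m him hm hc
    exact hmin m him hm ((pvPrefix_single t c m).mpr hc)

theorem pvG_stop (t : List Char) (i : Nat) (h : ¬ i < t.length) : pvG t i = [] := by
  rw [pvG]; simp [h]

theorem pvG_step_false (t : List Char) (i : Nat) (h : i < t.length)
    (hc : ¬ (t[i] = '[' ∧ pvM t i = true)) : pvG t i = t[i] :: pvG t (i+1) := by
  rw [pvG]; simp only [dif_pos h, if_neg hc]

theorem pvG_step_true (t : List Char) (i : Nat) (h : i < t.length)
    (hb : t[i] = '[') (hm : pvM t i = true) (hj : i < pvJump t i) :
    pvG t i = pvRep t i ++ pvG t (pvJump t i) := by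
  rw [pvG]; simp only [dif_pos h, if_pos (And.intro hb hm)]
  have hmax : max (i+1) (pvJump t i) = pvJump t i := by omega
  rw [hmax]

theorem pvG_chunk (t : List Char) (i k : Nat) (hik : i ≤ k) (hk : k ≤ t.length)
    (hnone : ∀ m, i ≤ m → m < k → t[m]? ≠ some '[') :
    pvG t i = List.take (k - i) (List.drop i t) ++ pvG t k := by
  obtain ⟨d, hd⟩ : ∃ d, k - i = d := ⟨_, rfl⟩
  induction d generalizing i with
  | zero =>
    have : i = k := by omega
    subst this; simp
  | succ d ih =>
    have hik' : i < k := by omega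
    have hlt : i < t.length := by omega
    have hne : t[i] ≠ '[' := by
      have := hnone i le_rfl hik'
      rw [List.getElem?_eq_getElem hlt] at this
      intro hx; exact this (by rw [hx])
    rw [pvG_step_false t i hlt (by rintro ⟨h1, _⟩; exact hne h1)]
    rw [ih (i+1) (by omega) (fun m hm hmk => hnone m (by omega) hmk) (by omega)]
    rw [List.drop_eq_getElem_cons hlt]
    have : k - i = (k - (i+1)) + 1 := by omega
    rw [this, List.take_succ_cons]
    simp

theorem pvG_drop (t : List Char) (i : Nat) (hi : i ≤ t.length)
    (hnone : ∀ m, i ≤ m → t[m]? ≠ some '[') :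
    pvG t i = List.drop i t := by
  rw [pvG_chunk t i t.length hi le_rfl (fun m hm _ => hnone m hm)]
  rw [pvG_stop t t.length (by omega)]
  simp [List.take_of_length_le]

theorem pvJoinNil (parts : List (List Char)) : PySem.Chars.join [] parts = parts.flatten := by
  simp [PySem.Chars.join, List.intercalate]
  induction parts with
  | nil => rfl
  | cons a l ih => cases l <;> simp_all [List.intersperse]

theorem pvSliceCode (t : List Char) (p : Nat)
    (h : List.take 7 (List.drop (p+1) t) = "{.code}".toList) : p + 8 ≤ t.length := by
  have hl := congrArg List.length h
  simp [List.length_take, List.length_drop] at hl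
  omega

theorem pvLoopA_eq (t : List Char) (hpre : ¬ "{.code}".toList <+: t) :
    ∀ (fuel i : Nat) (acc : List Char), i ≤ t.length → t.length - i < fuel →
      pvLoopA t fuel i acc = acc ++ pvG t i := by
  intro fuel
  induction fuel with
  | zero => intro i acc h1 h2; omega
  | succ fuel ih =>
    intro i acc hi hf
    rw [pvLoopA]
    by_cases h : i < t.length
    case neg =>
      rw [dif_neg h, pvG_stop t i h]; simp
    case pos =>
      rw [dif_pos h]
      have hfall : ∀ hc : ¬ (t[i] = '[' ∧ pvM t i = true),
          pvLoopA t fuel (i+1) (acc ++ [t[i]]) = acc ++ pvG t i := by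
        intro hc
        rw [ih (i+1) (acc ++ [t[i]]) (by omega) (by omega), pvG_step_false t i h hc]
        simp
      by_cases hb : t[i] = '['
      case neg =>
        rw [if_neg hb]
        exact hfall (by tauto)
      case pos =>
        rw [if_pos hb]
        simp only []
        by_cases hcb : PySem.Chars.findFrom t [']'] ↑i = -1
        · rw [if_neg (by simp [hcb])]
          exact hfall (by rintro ⟨-, hm⟩; simp [pvM, hcb] at hm)
        · obtain ⟨cbN, hcbeq, hicb, hcbn, hcbc, hcbmin⟩ :=
            pvFindFrom_pos t ']' i (by omega) hcb
          rw [hcbeq, if_pos (by simp)]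
          by_cases hpar : PySem.List.slice t (some ((cbN:Int)+1)) (some ((cbN:Int)+2)) = ['(']
          case neg =>
            rw [if_neg hpar]
            exact hfall (by rintro ⟨-, hm⟩; simp [pvM, hcbeq, hpar] at hm)
          case pos =>
            rw [if_pos hpar]
            by_cases hcp : PySem.Chars.findFrom t [')'] ((cbN:Int)) = -1
            · rw [hcp]
              have hcode0 : ¬ PySem.List.slice t (some ((-1:Int)+1)) (some ((-1:Int)+1+7)) = "{.code}".toList := by
                intro hx
                apply hpre
                rw [List.prefix_iff_eq_take]
                have e0 : ((-1:Int)+1) = ((0:Nat):Int) := by norm_num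
                have e7 : ((-1:Int)+1+7) = ((7:Nat):Int) := by norm_num
                rw [e7, e0, PySem.List.slice_natCast] at hx
                simpa using hx.symm
              rw [if_neg hcode0]
              exact hfall (by rintro ⟨-, hm⟩; simp [pvM, hcbeq, hcp] at hm)
            · obtain ⟨cpN, hcpeq, hcbcp, hcpn, hcpc, hcpmin⟩ :=
                pvFindFrom_pos t ')' cbN (by omega) hcp
              rw [hcpeq]
              by_cases hcode : PySem.List.slice t (some ((cpN:Int)+1)) (some ((cpN:Int)+1+7)) = "{.code}".toList
              case neg =>
                rw [if_neg hcode]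
                refine hfall ?_
                rintro ⟨-, hm⟩
                have e8 : ((cpN:Int)+1+7) = ((cpN:Int)+8) := by ring
                rw [e8] at hcode
                simp [pvM, hcbeq, hcpeq, hpar] at hm
                exact absurd hm (by simpa using hcode)
              case pos =>
                rw [if_pos hcode]
                -- bounds from the 7-character slice
                have e1 : ((cpN:Int)+1) = ((cpN+1 : Nat):Int) := by push_cast; ring
                have e8 : ((cpN:Int)+1+7) = ((cpN+8 : Nat):Int) := by push_cast; ring
                have hcode' : List.take 7 (List.drop (cpN+1) t) = "{.code}".toList := by
                  have hx := hcode
                  rw [e8, e1, PySem.List.slice_natCast] at hx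
                  have : (cpN+8) - (cpN+1) = 7 := by omega
                  rw [this] at hx; exact hx
                have hbound : cpN + 8 ≤ t.length := pvSliceCode t cpN hcode'
                have htn : (((cpN:Int)+1+7)).toNat = cpN + 8 := by omega
                rw [htn]
                rw [ih (cpN+8) _ (by omega) (by omega)]
                have hm : pvM t i = true := by
                  have e8' : ((cpN:Int)+8) = ((cpN:Int)+1+7) := by ring
                  simp [pvM, hcbeq, hcpeq, hpar, e8', hcode]
                have hjump : pvJump t i = cpN + 8 := by
                  simp [pvJump, hcbeq, hcpeq]
                  omega
                rw [pvG_step_true t i h hb hm (by omega), hjump]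
                simp [pvRep, hcbeq, hcpeq, List.append_assoc]

theorem pvLoopB_eq (t : List Char) :
    ∀ (fuel i : Nat) (parts : List (List Char)), i ≤ t.length → t.length - i < fuel →
      (pvLoopB t fuel i parts).flatten = parts.flatten ++ pvG t i := by
  intro fuel
  induction fuel with
  | zero => intro i parts h1 h2; omega
  | succ fuel ih =>
    intro i parts hi hf
    rw [pvLoopB]
    simp only []
    by_cases hk : PySem.Chars.findFrom t ['['] ↑i = -1
    · rw [if_pos hk]
      rw [PySem.List.slice_from t (by positivity)]
      rw [pvG_drop t i hi (fun m hm => (pvFindFrom_neg t '[' i hi).mp hk m hm)]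
      simp
    · obtain ⟨kN, hkeq, hik, hkn, hkc, hkmin⟩ := pvFindFrom_pos t '[' i hi hk
      rw [hkeq, if_neg (by simp)]
      have hchunk : pvG t i = List.take (kN - i) (List.drop i t) ++ pvG t kN :=
        pvG_chunk t i kN hik (by omega) (fun m h1 h2 => hkmin m h1 h2)
      have hkget : t[kN] = '[' := by
        rw [List.getElem?_eq_getElem hkn] at hkc
        exact Option.some.inj hkc
      have hsliceik : PySem.List.slice t (some ↑i) (some ((kN:Int))) = List.take (kN - i) (List.drop i t) := by
        rw [PySem.List.slice_natCast]
      have hnm : pvM t kN = false →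
          (pvLoopB t fuel ((kN:Int)+1).toNat (parts ++ [PySem.List.slice t (some ↑i) (some ((kN:Int)+1))])).flatten
            = parts.flatten ++ pvG t i := by
        intro hm
        have e1 : ((kN:Int)+1) = ((kN+1 : Nat):Int) := by push_cast; ring
        have htn : ((kN:Int)+1).toNat = kN + 1 := by omega
        rw [htn, ih (kN+1) _ (by omega) (by omega)]
        rw [e1, PySem.List.slice_natCast]
        rw [hchunk, pvG_step_false t kN hkn (by rintro ⟨-, hx⟩; rw [hm] at hx; cases hx)]
        have htake : List.take (kN+1-i) (List.drop i t) = List.take (kN-i) (List.drop i t) ++ [t[kN]] := by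
          have hsucc : kN+1-i = (kN-i)+1 := by omega
          rw [hsucc, List.take_add_one]
          have : (List.drop i t)[kN-i]? = some t[kN] := by
            rw [List.getElem?_drop]
            have : i + (kN - i) = kN := by omega
            rw [this, List.getElem?_eq_getElem hkn]
          rw [this]
          rfl
        rw [htake, hkget]
        simp [List.append_assoc]
      by_cases hj : PySem.Chars.findFrom t [']'] ((kN:Int)) = -1
      · rw [if_neg (by rintro ⟨hx, -⟩; exact hx hj)]
        exact hnm (by simp [pvM, hj])
      · obtain ⟨jN, hjeq, hkj, hjn, hjc, hjmin⟩ := pvFindFrom_pos t ']' kN (by omega) hj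
        rw [hjeq]
        have hpif : (if ((jN:Nat):Int) ≠ -1 then PySem.Chars.findFrom t [')'] ↑jN else -1)
            = PySem.Chars.findFrom t [')'] ↑jN := if_pos (by simp)
        rw [hpif]
        by_cases hpar : PySem.List.slice t (some ((jN:Int)+1)) (some ((jN:Int)+2)) = ['(']
        case neg =>
          rw [if_neg (by rintro ⟨-, hx, -⟩; exact hpar hx)]
          exact hnm (by simp [pvM, hjeq, hpar])
        case pos =>
          by_cases hp : PySem.Chars.findFrom t [')'] ((jN:Int)) = -1
          · rw [if_neg (by rintro ⟨-, -, hx, -⟩; exact hx hp)]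
            exact hnm (by simp [pvM, hjeq, hp])
          · obtain ⟨pN, hpeq, hjp, hpn, hpc, hpmin⟩ := pvFindFrom_pos t ')' jN (by omega) hp
            rw [hpeq]
            by_cases hcode : PySem.List.slice t (some ((pN:Int)+1)) (some ((pN:Int)+8)) = "{.code}".toList
            case neg =>
              rw [if_neg (by rintro ⟨-, -, -, hx⟩; exact hcode hx)]
              exact hnm (by simp [pvM, hjeq, hpeq, hpar]; simpa using hcode)
            case pos =>
              rw [if_pos ⟨by simp, hpar, by simp, hcode⟩]
              have e1 : ((pN:Int)+1) = ((pN+1 : Nat):Int) := by push_cast; ring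
              have e8 : ((pN:Int)+8) = ((pN+8 : Nat):Int) := by push_cast; ring
              have hcode' : List.take 7 (List.drop (pN+1) t) = "{.code}".toList := by
                have hx := hcode
                rw [e8, e1, PySem.List.slice_natCast] at hx
                have : (pN+8) - (pN+1) = 7 := by omega
                rw [this] at hx; exact hx
              have hbound : pN + 8 ≤ t.length := pvSliceCode t pN hcode'
              have htn : ((pN:Int)+8).toNat = pN + 8 := by omega
              rw [htn, ih (pN+8) _ (by omega) (by omega)]
              have hm : pvM t kN = true := by
                simp [pvM, hjeq, hpeq, hpar]
                simpa using hcode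
              have hjump : pvJump t kN = pN + 8 := by
                simp [pvJump, hjeq, hpeq]
                omega
              rw [hchunk, pvG_step_true t kN hkn hkget hm (by omega), hjump]
              rw [hsliceik]
              simp [pvRep, hjeq, hpeq, List.append_assoc]

-- ===== VERDICT (by name: the statement is the Claim_ definition above) =====
theorem clean_inline_code_spec : Claim_equal_clean_inline_code := by
  intro text hdom hpre
  unfold Spec_clean_inline_code clean_inline_code clean_inline_code_alt
  have hnp : ¬ "{.code}".toList <+: text.toList := by
    unfold Pre_clean_inline_code at hpre
    rw [PySem.Str.startswith_eq] at hpre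
    intro hx
    rw [(PySem.Chars.startswith_iff _ _).mpr hx] at hpre
    cases hpre
  rw [pvLoopA_eq text.toList hnp (text.toList.length+1) 0 [] (by omega) (by omega)]
  rw [pvJoinNil, pvLoopB_eq text.toList (text.toList.length+2) 0 [] (by omega) (by omega)]
  simp
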